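-- pv_equiv track=rewrite | github.com/Jihyung01/wherehere | backend/routes/users.py | _mock_user_stats
-- ===== SOURCE A (Python) =====
-- def _mock_user_stats(total_xp: int = 1580):
--     XP = (0, 150, 400, 750, 1200, 1750, 2400, 3150, 4000, 5000)
--     level = 1
--     for i in range(1, 10):
--         if total_xp >= XP[i]:
--             level = i + 1
--         else:
--             break
--     xp_to_next = max(0, XP[level] - total_xp) if level < 10 else 0
--     return level, total_xp, xp_to_next
-- ===== SOURCE B (Python) =====
-- import bisect
--
-- def _mock_user_stats(total_xp: int = 1580):
--     XP = (0, 150, 400, 750, 1200, 1750, 2400, 3150, 4000, 5000)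
--     level = max(1, bisect.bisect_right(XP, total_xp))
--     xp_to_next = max(0, XP[level] - total_xp) if level < 10 else 0
--     return level, total_xp, xp_to_next
-- ===== Notes on version B (the rewrite author's own statement) =====
-- stated objective: idiomatic
-- what changed: Replaced the sequential scan-with-break over the XP thresholds by a binary search (bisect.bisect_right) into the sorted threshold tuple, clamped with max(1, ...).
import Mathlib
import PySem

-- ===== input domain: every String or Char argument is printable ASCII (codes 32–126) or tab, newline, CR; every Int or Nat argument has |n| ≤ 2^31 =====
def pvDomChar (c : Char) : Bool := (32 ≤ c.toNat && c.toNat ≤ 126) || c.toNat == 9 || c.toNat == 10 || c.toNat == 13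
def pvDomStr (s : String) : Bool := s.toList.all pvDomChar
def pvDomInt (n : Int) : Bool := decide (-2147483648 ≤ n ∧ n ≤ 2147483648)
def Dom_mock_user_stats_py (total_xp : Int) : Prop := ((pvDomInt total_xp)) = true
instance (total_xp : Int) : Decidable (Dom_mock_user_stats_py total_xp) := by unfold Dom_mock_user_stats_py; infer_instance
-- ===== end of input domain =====

-- B replaces A's sequential scan-with-break over the XP thresholds by a binary search (bisect_right) threshold lookup; objective: idiomatic.


-- ===== PORT A =====
-- the XP threshold tuple both Pythons define
def pvXP : List Int := [0, 150, 400, 750, 1200, 1750, 2400, 3150, 4000, 5000]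

-- A's for-loop over range(1,10) with break, as a fold carrying (level, broken)
def mock_user_stats_py (total_xp : Int) : Int × Int × Int :=
  let st := (PySem.List.pyRange 1 10 1).foldl
    (fun (s : Int × Bool) i =>
      if s.2 then s
      else if total_xp ≥ (PySem.List.pyGet? pvXP i).getD 0 then (i + 1, false)
      else (s.1, true))
    (1, false)
  let level := st.1
  let xp_to_next := if level < 10 then max 0 ((PySem.List.pyGet? pvXP level).getD 0 - total_xp) else 0
  (level, total_xp, xp_to_next)

-- ===== PORT B =====
-- hand-written port of bisect.bisect_right's binary-search loop (exact: lo, hi and mid are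
-- nonnegative throughout, where Python's // agrees with Nat division; xs.getD mid 0 is only
-- reached with lo ≤ mid < hi ≤ xs.length, i.e. in range, exactly as in Python)
def pvBisectRight (xs : List Int) (x : Int) (lo hi : Nat) : Nat :=
  if h : lo < hi then
    let mid := (lo + hi) / 2
    if x < xs.getD mid 0 then pvBisectRight xs x lo mid
    else pvBisectRight xs x (mid + 1) hi
  else lo
termination_by hi - lo
decreasing_by all_goals omega

def mock_user_stats_py_alt (total_xp : Int) : Int × Int × Int :=
  let level : Int := max 1 ((pvBisectRight pvXP total_xp 0 pvXP.length : Nat) : Int)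
  let xp_to_next := if level < 10 then max 0 ((PySem.List.pyGet? pvXP level).getD 0 - total_xp) else 0
  (level, total_xp, xp_to_next)

-- ===== PRECONDITION & SPEC =====
def Spec_mock_user_stats_py (total_xp : Int) (out : Int × Int × Int) : Prop := out = mock_user_stats_py_alt total_xp
instance (total_xp : Int) (out : Int × Int × Int) : Decidable (Spec_mock_user_stats_py total_xp out) := by unfold Spec_mock_user_stats_py; infer_instance

-- ===== CLAIM (what is proved, stated in full; the proofs are below) =====
def Claim_equal_mock_user_stats_py : Prop := ∀ (total_xp : Int), Dom_mock_user_stats_py total_xp → Spec_mock_user_stats_py total_xp (mock_user_stats_py total_xp)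

-- ===== LEMMAS AND PROOFS =====

-- the level both programs compute, written as an explicit threshold chain
def pvLevel (t : Int) : Int :=
  if t < 150 then 1 else if t < 400 then 2 else if t < 750 then 3 else if t < 1200 then 4
  else if t < 1750 then 5 else if t < 2400 then 6 else if t < 3150 then 7 else if t < 4000 then 8
  else if t < 5000 then 9 else 10

lemma pvBisect_level (t : Int) :
    max 1 ((pvBisectRight pvXP t 0 pvXP.length : Nat) : Int) = pvLevel t := by
  unfold pvLevel
  simp only [pvXP, List.length]
  norm_num
  repeat (rw [pvBisectRight]; norm_num [List.getD])
  split_ifs <;> omega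

lemma pvLoop_level (t : Int) :
    ((PySem.List.pyRange 1 10 1).foldl
      (fun (s : Int × Bool) i =>
        if s.2 then s
        else if t ≥ (PySem.List.pyGet? pvXP i).getD 0 then (i + 1, false)
        else (s.1, true))
      (1, false)).1 = pvLevel t := by
  rw [show PySem.List.pyRange 1 10 1 = [1,2,3,4,5,6,7,8,9] from by rfl]
  by_cases h1 : t < 150
  · norm_num [List.foldl_cons, List.foldl_nil, pvXP, PySem.List.pyGet?, PySem.List.pyIdx?, pvLevel, show ((2:Int).toNat) = 2 from rfl, show ((3:Int).toNat) = 3 from rfl, show ((4:Int).toNat) = 4 from rfl, show ((5:Int).toNat) = 5 from rfl, show ((6:Int).toNat) = 6 from rfl, show ((7:Int).toNat) = 7 from rfl, show ((8:Int).toNat) = 8 from rfl, show ((9:Int).toNat) = 9 from rfl, List.getElem_cons_succ, List.getElem_cons_zero,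
      show ¬((150:Int) ≤ t) from by omega,
      show ¬((400:Int) ≤ t) from by omega,
      show ¬((750:Int) ≤ t) from by omega,
      show ¬((1200:Int) ≤ t) from by omega,
      show ¬((1750:Int) ≤ t) from by omega,
      show ¬((2400:Int) ≤ t) from by omega,
      show ¬((3150:Int) ≤ t) from by omega,
      show ¬((4000:Int) ≤ t) from by omega,
      show ¬((5000:Int) ≤ t) from by omega]
    try omega
  by_cases h2 : t < 400
  · norm_num [List.foldl_cons, List.foldl_nil, pvXP, PySem.List.pyGet?, PySem.List.pyIdx?, pvLevel, show ((2:Int).toNat) = 2 from rfl, show ((3:Int).toNat) = 3 from rfl, show ((4:Int).toNat) = 4 from rfl, show ((5:Int).toNat) = 5 from rfl, show ((6:Int).toNat) = 6 from rfl, show ((7:Int).toNat) = 7 from rfl, show ((8:Int).toNat) = 8 from rfl, show ((9:Int).toNat) = 9 from rfl, List.getElem_cons_succ, List.getElem_cons_zero,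
      show ((150:Int) ≤ t) from by omega,
      show ¬((400:Int) ≤ t) from by omega,
      show ¬((750:Int) ≤ t) from by omega,
      show ¬((1200:Int) ≤ t) from by omega,
      show ¬((1750:Int) ≤ t) from by omega,
      show ¬((2400:Int) ≤ t) from by omega,
      show ¬((3150:Int) ≤ t) from by omega,
      show ¬((4000:Int) ≤ t) from by omega,
      show ¬((5000:Int) ≤ t) from by omega]
    try omega
  by_cases h3 : t < 750
  · norm_num [List.foldl_cons, List.foldl_nil, pvXP, PySem.List.pyGet?, PySem.List.pyIdx?, pvLevel, show ((2:Int).toNat) = 2 from rfl, show ((3:Int).toNat) = 3 from rfl, show ((4:Int).toNat) = 4 from rfl, show ((5:Int).toNat) = 5 from rfl, show ((6:Int).toNat) = 6 from rfl, show ((7:Int).toNat) = 7 from rfl, show ((8:Int).toNat) = 8 from rfl, show ((9:Int).toNat) = 9 from rfl, List.getElem_cons_succ, List.getElem_cons_zero,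
      show ((150:Int) ≤ t) from by omega,
      show ((400:Int) ≤ t) from by omega,
      show ¬((750:Int) ≤ t) from by omega,
      show ¬((1200:Int) ≤ t) from by omega,
      show ¬((1750:Int) ≤ t) from by omega,
      show ¬((2400:Int) ≤ t) from by omega,
      show ¬((3150:Int) ≤ t) from by omega,
      show ¬((4000:Int) ≤ t) from by omega,
      show ¬((5000:Int) ≤ t) from by omega]
    try omega
  by_cases h4 : t < 1200
  · norm_num [List.foldl_cons, List.foldl_nil, pvXP, PySem.List.pyGet?, PySem.List.pyIdx?, pvLevel, show ((2:Int).toNat) = 2 from rfl, show ((3:Int).toNat) = 3 from rfl, show ((4:Int).toNat) = 4 from rfl, show ((5:Int).toNat) = 5 from rfl, show ((6:Int).toNat) = 6 from rfl, show ((7:Int).toNat) = 7 from rfl, show ((8:Int).toNat) = 8 from rfl, show ((9:Int).toNat) = 9 from rfl, List.getElem_cons_succ, List.getElem_cons_zero,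
      show ((150:Int) ≤ t) from by omega,
      show ((400:Int) ≤ t) from by omega,
      show ((750:Int) ≤ t) from by omega,
      show ¬((1200:Int) ≤ t) from by omega,
      show ¬((1750:Int) ≤ t) from by omega,
      show ¬((2400:Int) ≤ t) from by omega,
      show ¬((3150:Int) ≤ t) from by omega,
      show ¬((4000:Int) ≤ t) from by omega,
      show ¬((5000:Int) ≤ t) from by omega]
    try omega
  by_cases h5 : t < 1750
  · norm_num [List.foldl_cons, List.foldl_nil, pvXP, PySem.List.pyGet?, PySem.List.pyIdx?, pvLevel, show ((2:Int).toNat) = 2 from rfl, show ((3:Int).toNat) = 3 from rfl, show ((4:Int).toNat) = 4 from rfl, show ((5:Int).toNat) = 5 from rfl, show ((6:Int).toNat) = 6 from rfl, show ((7:Int).toNat) = 7 from rfl, show ((8:Int).toNat) = 8 from rfl, show ((9:Int).toNat) = 9 from rfl, List.getElem_cons_succ, List.getElem_cons_zero,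
      show ((150:Int) ≤ t) from by omega,
      show ((400:Int) ≤ t) from by omega,
      show ((750:Int) ≤ t) from by omega,
      show ((1200:Int) ≤ t) from by omega,
      show ¬((1750:Int) ≤ t) from by omega,
      show ¬((2400:Int) ≤ t) from by omega,
      show ¬((3150:Int) ≤ t) from by omega,
      show ¬((4000:Int) ≤ t) from by omega,
      show ¬((5000:Int) ≤ t) from by omega]
    try omega
  by_cases h6 : t < 2400
  · norm_num [List.foldl_cons, List.foldl_nil, pvXP, PySem.List.pyGet?, PySem.List.pyIdx?, pvLevel, show ((2:Int).toNat) = 2 from rfl, show ((3:Int).toNat) = 3 from rfl, show ((4:Int).toNat) = 4 from rfl, show ((5:Int).toNat) = 5 from rfl, show ((6:Int).toNat) = 6 from rfl, show ((7:Int).toNat) = 7 from rfl, show ((8:Int).toNat) = 8 from rfl, show ((9:Int).toNat) = 9 from rfl, List.getElem_cons_succ, List.getElem_cons_zero,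
      show ((150:Int) ≤ t) from by omega,
      show ((400:Int) ≤ t) from by omega,
      show ((750:Int) ≤ t) from by omega,
      show ((1200:Int) ≤ t) from by omega,
      show ((1750:Int) ≤ t) from by omega,
      show ¬((2400:Int) ≤ t) from by omega,
      show ¬((3150:Int) ≤ t) from by omega,
      show ¬((4000:Int) ≤ t) from by omega,
      show ¬((5000:Int) ≤ t) from by omega]
    try omega
  by_cases h7 : t < 3150
  · norm_num [List.foldl_cons, List.foldl_nil, pvXP, PySem.List.pyGet?, PySem.List.pyIdx?, pvLevel, show ((2:Int).toNat) = 2 from rfl, show ((3:Int).toNat) = 3 from rfl, show ((4:Int).toNat) = 4 from rfl, show ((5:Int).toNat) = 5 from rfl, show ((6:Int).toNat) = 6 from rfl, show ((7:Int).toNat) = 7 from rfl, show ((8:Int).toNat) = 8 from rfl, show ((9:Int).toNat) = 9 from rfl, List.getElem_cons_succ, List.getElem_cons_zero,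
      show ((150:Int) ≤ t) from by omega,
      show ((400:Int) ≤ t) from by omega,
      show ((750:Int) ≤ t) from by omega,
      show ((1200:Int) ≤ t) from by omega,
      show ((1750:Int) ≤ t) from by omega,
      show ((2400:Int) ≤ t) from by omega,
      show ¬((3150:Int) ≤ t) from by omega,
      show ¬((4000:Int) ≤ t) from by omega,
      show ¬((5000:Int) ≤ t) from by omega]
    try omega
  by_cases h8 : t < 4000
  · norm_num [List.foldl_cons, List.foldl_nil, pvXP, PySem.List.pyGet?, PySem.List.pyIdx?, pvLevel, show ((2:Int).toNat) = 2 from rfl, show ((3:Int).toNat) = 3 from rfl, show ((4:Int).toNat) = 4 from rfl, show ((5:Int).toNat) = 5 from rfl, show ((6:Int).toNat) = 6 from rfl, show ((7:Int).toNat) = 7 from rfl, show ((8:Int).toNat) = 8 from rfl, show ((9:Int).toNat) = 9 from rfl, List.getElem_cons_succ, List.getElem_cons_zero,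
      show ((150:Int) ≤ t) from by omega,
      show ((400:Int) ≤ t) from by omega,
      show ((750:Int) ≤ t) from by omega,
      show ((1200:Int) ≤ t) from by omega,
      show ((1750:Int) ≤ t) from by omega,
      show ((2400:Int) ≤ t) from by omega,
      show ((3150:Int) ≤ t) from by omega,
      show ¬((4000:Int) ≤ t) from by omega,
      show ¬((5000:Int) ≤ t) from by omega]
    try omega
  by_cases h9 : t < 5000
  · norm_num [List.foldl_cons, List.foldl_nil, pvXP, PySem.List.pyGet?, PySem.List.pyIdx?, pvLevel, show ((2:Int).toNat) = 2 from rfl, show ((3:Int).toNat) = 3 from rfl, show ((4:Int).toNat) = 4 from rfl, show ((5:Int).toNat) = 5 from rfl, show ((6:Int).toNat) = 6 from rfl, show ((7:Int).toNat) = 7 from rfl, show ((8:Int).toNat) = 8 from rfl, show ((9:Int).toNat) = 9 from rfl, List.getElem_cons_succ, List.getElem_cons_zero,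
      show ((150:Int) ≤ t) from by omega,
      show ((400:Int) ≤ t) from by omega,
      show ((750:Int) ≤ t) from by omega,
      show ((1200:Int) ≤ t) from by omega,
      show ((1750:Int) ≤ t) from by omega,
      show ((2400:Int) ≤ t) from by omega,
      show ((3150:Int) ≤ t) from by omega,
      show ((4000:Int) ≤ t) from by omega,
      show ¬((5000:Int) ≤ t) from by omega]
    try omega
  · norm_num [List.foldl_cons, List.foldl_nil, pvXP, PySem.List.pyGet?, PySem.List.pyIdx?, pvLevel, show ((2:Int).toNat) = 2 from rfl, show ((3:Int).toNat) = 3 from rfl, show ((4:Int).toNat) = 4 from rfl, show ((5:Int).toNat) = 5 from rfl, show ((6:Int).toNat) = 6 from rfl, show ((7:Int).toNat) = 7 from rfl, show ((8:Int).toNat) = 8 from rfl, show ((9:Int).toNat) = 9 from rfl, List.getElem_cons_succ, List.getElem_cons_zero,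
      show ((150:Int) ≤ t) from by omega,
      show ((400:Int) ≤ t) from by omega,
      show ((750:Int) ≤ t) from by omega,
      show ((1200:Int) ≤ t) from by omega,
      show ((1750:Int) ≤ t) from by omega,
      show ((2400:Int) ≤ t) from by omega,
      show ((3150:Int) ≤ t) from by omega,
      show ((4000:Int) ≤ t) from by omega,
      show ((5000:Int) ≤ t) from by omega]
    try omega

theorem pv_main (t : Int) : mock_user_stats_py t = mock_user_stats_py_alt t := by
  simp only [mock_user_stats_py, mock_user_stats_py_alt]
  rw [pvLoop_level, pvBisect_level]

-- ===== VERDICT (by name: the statement is the Claim_ definition above) =====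
theorem mock_user_stats_py_spec : Claim_equal_mock_user_stats_py := by
  intro t _
  exact pv_main t
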